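-- pv_equiv track=rewrite | github.com/wyf-zzc/shuofang | modules/services/activity_service.py | format_activity_response
-- ===== SOURCE A (Python) =====
-- def format_activity_response(activities, year, month, is_fallback=False):
--     """格式化活动查询结果"""
--     source_tag = "（参考数据）" if is_fallback else ""
--     response = f" {year}年{month}月活动{source_tag}：\n\n"
--     response += f" 共找到 {len(activities)} 个活动\n\n"
--
--     for i, act in enumerate(activities, 1):
--         response += f"{i}. **{act['name']}**\n"
--         if act.get('date'):
--             response += f"    日期：{act['date']}\n"
--         if act.get('time'):
--             response += f"    时间：{act['time']}\n"
--         if act.get('location'):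
--             response += f"    地点：{act['location']}\n"
--         if act.get('desc'):
--             response += f"    简介：{act['desc']}\n"
--         response += "\n"
--
--     response += "💡 提示：具体时间地点以官方通知为准。"
--     return response
-- ===== SOURCE B (Python) =====
-- FIELDS = (('date', '日期'), ('time', '时间'), ('location', '地点'), ('desc', '简介'))
--
--
-- def _block(i, act):
--     """One activity rendered as a list of lines (no trailing newlines)."""
--     lines = [f"{i}. **{act['name']}**"]
--     for key, label in FIELDS:
--         v = act.get(key)
--         if v:
--             lines.append(f"    {label}：{v}")
--     return "\n".join(lines) + "\n\n"
--
--
-- def _rest(acts, i):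
--     """Recursively render activities acts numbered from i."""
--     if not acts:
--         return ""
--     return _block(i, acts[0]) + _rest(acts[1:], i + 1)
--
--
-- def format_activity_response(activities, year, month, is_fallback=False):
--     """格式化活动查询结果 — recursive descent, per-block newline-join assembly."""
--     tag = "（参考数据）" if is_fallback else ""
--     return (f" {year}年{month}月活动{tag}：\n\n"
--             f" 共找到 {len(activities)} 个活动\n\n"
--             + _rest(activities, 1)
--             + "💡 提示：具体时间地点以官方通知为准。")
-- ===== Notes on version B (the rewrite author's own statement) =====
-- stated objective: alternative
-- what changed: B renders each activity as a list of newline-free lines joined once with '\n' (table-driven fields) and assembles the body by structural recursion over the activity list, instead of A's single imperative loop with four hardcoded if-branches appending newline-terminated fragments to one growing string.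
-- outside the precondition, e.g. on format_activity_response([{'date': 'x'}], 2024, 1, False): A raises KeyError, B raises KeyError
import Mathlib
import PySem

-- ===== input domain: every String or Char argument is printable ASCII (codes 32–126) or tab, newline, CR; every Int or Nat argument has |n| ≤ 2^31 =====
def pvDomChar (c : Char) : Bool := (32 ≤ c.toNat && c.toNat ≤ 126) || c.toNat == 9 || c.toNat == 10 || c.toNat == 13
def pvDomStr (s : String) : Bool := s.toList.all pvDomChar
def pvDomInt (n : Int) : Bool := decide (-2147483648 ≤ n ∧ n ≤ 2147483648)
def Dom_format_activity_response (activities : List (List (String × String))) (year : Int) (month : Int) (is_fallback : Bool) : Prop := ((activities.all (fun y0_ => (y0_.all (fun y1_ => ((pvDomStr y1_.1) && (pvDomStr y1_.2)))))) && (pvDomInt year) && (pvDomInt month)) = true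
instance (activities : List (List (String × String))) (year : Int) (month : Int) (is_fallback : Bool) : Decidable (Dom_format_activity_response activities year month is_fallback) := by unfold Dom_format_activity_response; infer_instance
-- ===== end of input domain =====

-- B renders each activity as a list of newline-free lines joined once with "\n" (fields driven
-- by a literal table) and assembles the body by structural recursion over the activity list,
-- instead of A's imperative loop with four hardcoded branches appending newline-terminated
-- fragments to one growing string (objective: alternative decomposition; not claimed faster).

-- Python dict access on an association list (first match): act.get(k)
def pvGet (act : List (String × String)) (k : String) : Option String :=
  (act.find? (fun p => p.1 == k)).map (·.2)

-- Python truthiness of an Optional[str]: non-None and non-empty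
def pvTruthy (o : Option String) : Bool :=
  match o with
  | some v => v ≠ ""
  | none => false

-- ===== PORT A =====
def format_activity_response (activities : List (List (String × String))) (year : Int) (month : Int) (is_fallback : Bool) : String :=
  let source_tag := if is_fallback then "（参考数据）" else ""
  let response := " " ++ PySem.Int.toStr year ++ "年" ++ PySem.Int.toStr month ++ "月活动" ++ source_tag ++ "：\n\n"
  let response := response ++ " 共找到 " ++ PySem.Int.toStr (activities.length : Int) ++ " 个活动\n\n"
  let response := (PySem.List.enumerate activities 1).foldl (fun response p =>
      -- act['name']: under Pre_ the key is present, so getD "" is its value (KeyError excluded by Pre_);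
      -- inside each truthy branch act[k] = act.get(k) = (pvGet p.2 k).getD ""
      let response := response ++ PySem.Int.toStr p.1 ++ ". **" ++ (pvGet p.2 "name").getD "" ++ "**\n"
      let response := if pvTruthy (pvGet p.2 "date") then
          response ++ "    日期：" ++ (pvGet p.2 "date").getD "" ++ "\n" else response
      let response := if pvTruthy (pvGet p.2 "time") then
          response ++ "    时间：" ++ (pvGet p.2 "time").getD "" ++ "\n" else response
      let response := if pvTruthy (pvGet p.2 "location") then
          response ++ "    地点：" ++ (pvGet p.2 "location").getD "" ++ "\n" else response
      let response := if pvTruthy (pvGet p.2 "desc") then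
          response ++ "    简介：" ++ (pvGet p.2 "desc").getD "" ++ "\n" else response
      response ++ "\n") response
  response ++ "💡 提示：具体时间地点以官方通知为准。"

-- ===== PORT B =====
def pvFields : List (String × String) := [("date", "日期"), ("time", "时间"), ("location", "地点"), ("desc", "简介")]

-- Source B's _block: the line list built by the FIELDS loop, joined once with "\n"
def pvBlock (i : Int) (act : List (String × String)) : String :=
  let lines := [PySem.Int.toStr i ++ ". **" ++ (pvGet act "name").getD "" ++ "**"]
  let lines := pvFields.foldl (fun ls kl =>
      if pvTruthy (pvGet act kl.1) then
        ls ++ ["    " ++ kl.2 ++ "：" ++ (pvGet act kl.1).getD ""]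
      else ls) lines
  PySem.Str.join "\n" lines ++ "\n\n"

-- Source B's _rest: structural recursion over the remaining activities
def pvRest : List (List (String × String)) → Int → String
  | [], _ => ""
  | a :: t, i => pvBlock i a ++ pvRest t (i + 1)

def format_activity_response_alt (activities : List (List (String × String))) (year : Int) (month : Int) (is_fallback : Bool) : String :=
  let tag := if is_fallback then "（参考数据）" else ""
  (" " ++ PySem.Int.toStr year ++ "年" ++ PySem.Int.toStr month ++ "月活动" ++ tag ++ "：\n\n"
   ++ " 共找到 " ++ PySem.Int.toStr (activities.length : Int) ++ " 个活动\n\n")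
  ++ pvRest activities 1
  ++ "💡 提示：具体时间地点以官方通知为准。"

-- ===== PRECONDITION & SPEC =====
-- Pre_ excludes exactly the inputs where A raises KeyError: an activity dict with no 'name' key.
def Pre_format_activity_response (activities : List (List (String × String))) (year : Int) (month : Int) (is_fallback : Bool) : Prop :=
  ∀ act ∈ activities, (pvGet act "name").isSome = true
instance (activities : List (List (String × String))) (year : Int) (month : Int) (is_fallback : Bool) : Decidable (Pre_format_activity_response activities year month is_fallback) := by unfold Pre_format_activity_response; infer_instance

def pvWitness_format_activity_response : (List (List (String × String))) × Int × Int × Bool :=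
  ([[("name", "Hike"), ("date", "3-1"), ("desc", "")], [("name", "Talk"), ("time", "19:00")]], 2024, 3, false)

def Spec_format_activity_response (activities : List (List (String × String))) (year : Int) (month : Int) (is_fallback : Bool) (out : String) : Prop := out = format_activity_response_alt activities year month is_fallback
instance (activities : List (List (String × String))) (year : Int) (month : Int) (is_fallback : Bool) (out : String) : Decidable (Spec_format_activity_response activities year month is_fallback out) := by unfold Spec_format_activity_response; infer_instance

-- ===== CLAIM (what is proved, stated in full; the proofs are below) =====
def Claim_equal_format_activity_response : Prop := ∀ (activities : List (List (String × String))) (year : Int) (month : Int) (is_fallback : Bool), Dom_format_activity_response activities year month is_fallback → Pre_format_activity_response activities year month is_fallback → Spec_format_activity_response activities year month is_fallback (format_activity_response activities year month is_fallback)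

-- ===== LEMMAS AND PROOFS =====

theorem pvJoin_cons₂ (x y : String) (l : List String) :
    PySem.Str.join "\n" (x :: y :: l) = x ++ "\n" ++ PySem.Str.join "\n" (y :: l) := by
  simp [PySem.Str.join, PySem.Chars.join_cons_cons, ← String.toList_inj, String.toList_append]

theorem pvJoin_one (x : String) : PySem.Str.join "\n" [x] = x := by
  simp [PySem.Str.join, PySem.Chars.join_singleton]

-- the string A's four branches add for one field
def pvFieldStr (o : Option String) (pre : String) : String :=
  if pvTruthy o then pre ++ o.getD "" ++ "\n" else ""

-- the joined block equals A's per-activity chunk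
theorem pvBlock_eq (i : Int) (act : List (String × String)) :
    pvBlock i act =
      PySem.Int.toStr i ++ ". **" ++ (pvGet act "name").getD "" ++ "**\n"
      ++ pvFieldStr (pvGet act "date") "    日期："
      ++ pvFieldStr (pvGet act "time") "    时间："
      ++ pvFieldStr (pvGet act "location") "    地点："
      ++ pvFieldStr (pvGet act "desc") "    简介：" ++ "\n" := by
  simp only [pvBlock, pvFields, List.foldl_cons, List.foldl_nil]
  cases hd : pvTruthy (pvGet act "date") <;>
    cases ht : pvTruthy (pvGet act "time") <;>
      cases hl : pvTruthy (pvGet act "location") <;>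
        cases hs : pvTruthy (pvGet act "desc") <;>
          simp [pvFieldStr, hd, ht, hl, hs, pvJoin_cons₂, pvJoin_one, String.append_assoc] <;>
            simp [← String.append_assoc]

-- A's loop body adds exactly B's block
theorem pvStepA_eq (r : String) (p : Int × List (String × String)) :
    (let response := r ++ PySem.Int.toStr p.1 ++ ". **" ++ (pvGet p.2 "name").getD "" ++ "**\n"
     let response := if pvTruthy (pvGet p.2 "date") then
         response ++ "    日期：" ++ (pvGet p.2 "date").getD "" ++ "\n" else response
     let response := if pvTruthy (pvGet p.2 "time") then
         response ++ "    时间：" ++ (pvGet p.2 "time").getD "" ++ "\n" else response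
     let response := if pvTruthy (pvGet p.2 "location") then
         response ++ "    地点：" ++ (pvGet p.2 "location").getD "" ++ "\n" else response
     let response := if pvTruthy (pvGet p.2 "desc") then
         response ++ "    简介：" ++ (pvGet p.2 "desc").getD "" ++ "\n" else response
     response ++ "\n") = r ++ pvBlock p.1 p.2 := by
  rw [pvBlock_eq]
  cases hd : pvTruthy (pvGet p.2 "date") <;>
    cases ht : pvTruthy (pvGet p.2 "time") <;>
      cases hl : pvTruthy (pvGet p.2 "location") <;>
        cases hs : pvTruthy (pvGet p.2 "desc") <;>
          simp [pvFieldStr, hd, ht, hl, hs, String.append_assoc] <;>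
            simp [← String.append_assoc]

-- A's whole loop over the enumerated activities equals B's recursion
theorem pvFoldA_eq (l : List (List (String × String))) (i : Int) (r : String) :
    (PySem.List.enumerate l i).foldl (fun response p =>
      let response := response ++ PySem.Int.toStr p.1 ++ ". **" ++ (pvGet p.2 "name").getD "" ++ "**\n"
      let response := if pvTruthy (pvGet p.2 "date") then
          response ++ "    日期：" ++ (pvGet p.2 "date").getD "" ++ "\n" else response
      let response := if pvTruthy (pvGet p.2 "time") then
          response ++ "    时间：" ++ (pvGet p.2 "time").getD "" ++ "\n" else response
      let response := if pvTruthy (pvGet p.2 "location") then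
          response ++ "    地点：" ++ (pvGet p.2 "location").getD "" ++ "\n" else response
      let response := if pvTruthy (pvGet p.2 "desc") then
          response ++ "    简介：" ++ (pvGet p.2 "desc").getD "" ++ "\n" else response
      response ++ "\n") r
    = r ++ pvRest l i := by
  induction l generalizing i r with
  | nil => simp [PySem.List.enumerate_nil, pvRest]
  | cons a t ih =>
    rw [PySem.List.enumerate_cons, List.foldl_cons, pvStepA_eq r (i, a), ih, pvRest,
        String.append_assoc]

-- ===== VERDICT (by name: the statement is the Claim_ definition above) =====
theorem format_activity_response_spec : Claim_equal_format_activity_response := by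
  intro activities year month is_fallback _ _
  unfold Spec_format_activity_response format_activity_response format_activity_response_alt
  simp only [pvFoldA_eq]
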